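-- pv_equiv track=rewrite | github.com/MissChengLX/EPC_estimation | Data processing/NighttimeData_Preprocessing.py | mk_trend
-- ===== SOURCE A (Python) =====
-- def mk_trend(x):
--     s = 0
--     length = len(x)
--     for m in range(0, length - 1):
--         for n in range(m + 1, length):
--             if x[n] > x[m]:
--                 s = s + 1
--             elif x[n] == x[m]:
--                 s = s + 0
--             else:
--                 s = s - 1
--     return s
-- ===== SOURCE B (Python) =====
-- def mk_trend(x):
--     # Mann-Kendall S = C(n,2) - #{i<j: x[j] <= x[i]} - #{i<j: x[j] < x[i]}
--     # both pair counts found by merge-sort counting: O(n log n) instead of O(n^2).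
--     def sort_count(a, cmp):
--         # returns (sorted copy of a, number of pairs i<j with cmp(a[j], a[i]))
--         if len(a) <= 1:
--             return a, 0
--         mid = len(a) // 2
--         left, il = sort_count(a[:mid], cmp)
--         right, ir = sort_count(a[mid:], cmp)
--         merged = []
--         cnt = il + ir
--         i = j = 0
--         while i < len(left) and j < len(right):
--             if cmp(right[j], left[i]):
--                 cnt += len(left) - i
--                 merged.append(right[j])
--                 j += 1
--             else:
--                 merged.append(left[i])
--                 i += 1
--         merged.extend(left[i:])
--         merged.extend(right[j:])
--         return merged, cnt
--     n = len(x)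
--     _, q = sort_count(x, lambda b, a: b < a)    # strictly decreasing pairs
--     _, qe = sort_count(x, lambda b, a: b <= a)  # non-increasing pairs
--     return n * (n - 1) // 2 - qe - q
-- ===== Notes on version B (the rewrite author's own statement) =====
-- stated objective: faster
-- what changed: Replaces the O(n^2) double loop over all index pairs by two merge-sort counting passes (non-increasing pairs and strictly decreasing pairs), returning n(n-1)/2 - qe - q.
import Mathlib
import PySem

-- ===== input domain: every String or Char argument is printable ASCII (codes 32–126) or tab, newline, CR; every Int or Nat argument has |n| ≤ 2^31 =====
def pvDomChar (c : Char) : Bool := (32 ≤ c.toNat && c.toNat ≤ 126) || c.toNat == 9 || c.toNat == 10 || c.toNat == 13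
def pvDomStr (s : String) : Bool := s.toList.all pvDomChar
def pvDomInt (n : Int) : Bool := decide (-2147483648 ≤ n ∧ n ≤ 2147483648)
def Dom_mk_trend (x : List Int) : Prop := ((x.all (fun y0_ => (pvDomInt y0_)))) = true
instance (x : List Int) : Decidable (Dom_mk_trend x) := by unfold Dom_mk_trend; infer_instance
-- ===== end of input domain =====

-- B replaces A's O(n^2) double loop by two merge-sort pair counts (O(n log n)):
-- S = C(n,2) - #{i<j : x[j] <= x[i]} - #{i<j : x[j] < x[i]}.

-- ===== PORT A =====
-- x[n], x[m] are ported with pyGetD: the range indices are always in bounds, so this is exact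
def mk_trend (x : List Int) : Int :=
  (PySem.List.pyRange 0 ((x.length : Int) - 1)).foldl (fun s m =>
    (PySem.List.pyRange (m + 1) (x.length : Int)).foldl (fun s n =>
      if PySem.List.pyGetD x n 0 > PySem.List.pyGetD x m 0 then s + 1
      else if PySem.List.pyGetD x n 0 = PySem.List.pyGetD x m 0 then s + 0
      else s - 1) s) 0

-- ===== PORT B =====
-- the merge of B's while-loop: (left, right) are the unconsumed suffixes; count len(left) when taking right
def mergeCnt (cmp : Int → Int → Bool) : List Int → List Int → List Int × Int
  | [], r => (r, 0)
  | a :: l, [] => (a :: l, 0)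
  | a :: l, b :: r =>
    if cmp b a then
      let p := mergeCnt cmp (a :: l) r
      (b :: p.1, p.2 + ((a :: l).length : Int))
    else
      let p := mergeCnt cmp l (b :: r)
      (a :: p.1, p.2)

def sortCnt (cmp : Int → Int → Bool) (a : List Int) : List Int × Int :=
  if a.length ≤ 1 then (a, 0)
  else
    let mid := a.length / 2
    let pl := sortCnt cmp (a.take mid)
    let pr := sortCnt cmp (a.drop mid)
    let pm := mergeCnt cmp pl.1 pr.1
    (pm.1, pl.2 + pr.2 + pm.2)
termination_by a.length
decreasing_by
  · simp; omega
  · simp; omega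

def mk_trend_alt (x : List Int) : Int :=
  let n : Int := (x.length : Int)
  let q := (sortCnt (fun b a => decide (b < a)) x).2
  let qe := (sortCnt (fun b a => decide (b ≤ a)) x).2
  PySem.Int.floordiv (n * (n - 1)) 2 - qe - q

-- ===== PRECONDITION & SPEC =====
def Spec_mk_trend (x : List Int) (out : Int) : Prop := out = mk_trend_alt x
instance (x : List Int) (out : Int) : Decidable (Spec_mk_trend x out) := by unfold Spec_mk_trend; infer_instance

-- ===== CLAIM (what is proved, stated in full; the proofs are below) =====
def Claim_equal_mk_trend : Prop := ∀ (x : List Int), Dom_mk_trend x → Spec_mk_trend x (mk_trend x)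

-- ===== LEMMAS AND PROOFS =====

-- sign of one pair, as A computes it
def sgn (u v : Int) : Int := if u > v then 1 else if u = v then 0 else -1

-- structural sum of signs over all pairs i < j  (value sgn x[j] x[i])
def sgnSum : List Int → Int
  | [] => 0
  | a :: t => (t.map (fun b => sgn b a)).sum + sgnSum t

-- number of pairs i < j with cmp x[j] x[i]
def cntPairs (cmp : Int → Int → Bool) : List Int → Nat
  | [] => 0
  | a :: t => t.countP (fun b => cmp b a) + cntPairs cmp t

-- cross pairs (a from l, b from r) with cmp b a
def cross (cmp : Int → Int → Bool) (l r : List Int) : Nat :=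
  (l.map (fun a => r.countP (fun b => cmp b a))).sum

lemma cntPairs_append (cmp : Int → Int → Bool) (l r : List Int) :
    cntPairs cmp (l ++ r) = cntPairs cmp l + cntPairs cmp r + cross cmp l r := by
  induction l with
  | nil => simp [cntPairs, cross]
  | cons a t ih => simp [cntPairs, cross, List.countP_append, ih, cross]; ring

lemma cross_perm (cmp : Int → Int → Bool) {l l' r r' : List Int}
    (hl : l.Perm l') (hr : r.Perm r') : cross cmp l r = cross cmp l' r' := by
  unfold cross
  have h1 : ∀ a, r.countP (fun b => cmp b a) = r'.countP (fun b => cmp b a) :=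
    fun a => hr.countP_eq _
  calc (l.map (fun a => r.countP (fun b => cmp b a))).sum
      = (l.map (fun a => r'.countP (fun b => cmp b a))).sum := by
        simp only [h1]
    _ = (l'.map (fun a => r'.countP (fun b => cmp b a))).sum :=
        (hl.map _).sum_eq

-- joint merge lemma under the monotonicity facts both comparators satisfy
lemma cross_cons_right (cmp : Int → Int → Bool) (l : List Int) (b : Int) (r : List Int) :
    cross cmp l (b :: r) = l.countP (fun a => cmp b a) + cross cmp l r := by
  induction l with
  | nil => simp [cross]
  | cons c l ih =>
    simp only [cross, List.map_cons, List.sum_cons, List.countP_cons] at *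
    by_cases h : cmp b c <;> simp [h] at * <;> omega

lemma cross_cons_left (cmp : Int → Int → Bool) (a : Int) (l r : List Int) :
    cross cmp (a :: l) r = r.countP (fun b => cmp b a) + cross cmp l r := by
  simp [cross]

lemma mergeCnt_spec (cmp : Int → Int → Bool)
    (Hmono : ∀ b a a', cmp b a = true → a ≤ a' → cmp b a' = true)
    (Hanti : ∀ b b' a, cmp b a = false → b ≤ b' → cmp b' a = false)
    (Hle : ∀ b a, cmp b a = true → b ≤ a)
    (Hge : ∀ b a, cmp b a = false → a ≤ b) :
    ∀ l r : List Int, l.Pairwise (· ≤ ·) → r.Pairwise (· ≤ ·) →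
      (mergeCnt cmp l r).1.Perm (l ++ r) ∧ (mergeCnt cmp l r).1.Pairwise (· ≤ ·) ∧
      (mergeCnt cmp l r).2 = (cross cmp l r : Int) := by
  suffices H : ∀ N (l r : List Int), l.length + r.length ≤ N →
      l.Pairwise (· ≤ ·) → r.Pairwise (· ≤ ·) →
      (mergeCnt cmp l r).1.Perm (l ++ r) ∧ (mergeCnt cmp l r).1.Pairwise (· ≤ ·) ∧
      (mergeCnt cmp l r).2 = (cross cmp l r : Int) by
    exact fun l r hl hr => H (l.length + r.length) l r le_rfl hl hr
  intro N
  induction N with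
  | zero =>
    intro l r hlen hl hr
    have h1 : l = [] := by cases l <;> simp_all
    have h2 : r = [] := by cases r <;> simp_all
    subst h1; subst h2
    simp [mergeCnt, cross]
  | succ N ih =>
    intro l r hlen hl hr
    cases l with
    | nil => simpa [mergeCnt, cross] using hr
    | cons a l =>
      cases r with
      | nil => simpa [mergeCnt, cross] using hl
      | cons b r =>
        rw [List.pairwise_cons] at hl hr
        cases hba : cmp b a with
        | true =>
          have hrec := ih (a :: l) r (by simp at hlen ⊢; omega)
            (List.pairwise_cons.mpr hl) hr.2
          obtain ⟨hp, hs, hc⟩ := hrec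
          have hmc : mergeCnt cmp (a :: l) (b :: r)
              = (b :: (mergeCnt cmp (a :: l) r).1,
                 (mergeCnt cmp (a :: l) r).2 + ((a :: l).length : Int)) := by
            simp [mergeCnt, hba]
          rw [hmc]
          refine ⟨?_, ?_, ?_⟩
          · exact (hp.cons b).trans List.perm_middle.symm
          · rw [List.pairwise_cons]
            refine ⟨?_, hs⟩
            intro y hy
            have hy2 := hp.mem_iff.mp hy
            simp only [List.mem_append, List.mem_cons] at hy2
            rcases hy2 with (rfl | hy') | hy'
            · exact Hle _ _ hba
            · exact le_trans (Hle b a hba) (hl.1 y hy')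
            · exact hr.1 y hy'
          · rw [hc, cross_cons_right]
            have hcall : (a :: l).countP (fun a' => cmp b a') = (a :: l).length := by
              rw [List.countP_eq_length]
              intro y hy
              simp only [List.mem_cons] at hy
              rcases hy with rfl | hy
              · exact hba
              · exact Hmono b a y hba (hl.1 y hy)
            rw [hcall]
            push_cast
            ring
        | false =>
          have hrec := ih l (b :: r) (by simp at hlen ⊢; omega)
            hl.2 (List.pairwise_cons.mpr hr)
          obtain ⟨hp, hs, hc⟩ := hrec
          have hmc : mergeCnt cmp (a :: l) (b :: r)
              = (a :: (mergeCnt cmp l (b :: r)).1, (mergeCnt cmp l (b :: r)).2) := by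
            simp [mergeCnt, hba]
          rw [hmc]
          refine ⟨?_, ?_, ?_⟩
          · exact hp.cons a
          · rw [List.pairwise_cons]
            refine ⟨?_, hs⟩
            intro y hy
            have hy2 := hp.mem_iff.mp hy
            simp only [List.mem_append, List.mem_cons] at hy2
            rcases hy2 with hy' | (rfl | hy')
            · exact hl.1 y hy'
            · exact Hge _ _ hba
            · exact le_trans (Hge b a hba) (hr.1 y hy')
          · rw [hc, cross_cons_left]
            have h0 : (b :: r).countP (fun b' => cmp b' a) = 0 := by
              rw [List.countP_eq_zero]
              intro y hy
              simp only [List.mem_cons] at hy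
              rcases hy with rfl | hy
              · simp [hba]
              · simp [Hanti b y a hba (hr.1 y hy)]
            rw [h0]
            push_cast
            ring

lemma sortCnt_small (cmp : Int → Int → Bool) (a : List Int) (h : a.length ≤ 1) :
    sortCnt cmp a = (a, 0) := by
  rw [sortCnt]; simp [h]

lemma sortCnt_step (cmp : Int → Int → Bool) (a : List Int) (h : ¬ a.length ≤ 1) :
    sortCnt cmp a =
      ((mergeCnt cmp (sortCnt cmp (a.take (a.length / 2))).1
          (sortCnt cmp (a.drop (a.length / 2))).1).1,
       (sortCnt cmp (a.take (a.length / 2))).2 + (sortCnt cmp (a.drop (a.length / 2))).2 +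
        (mergeCnt cmp (sortCnt cmp (a.take (a.length / 2))).1
          (sortCnt cmp (a.drop (a.length / 2))).1).2) := by
  rw [sortCnt]; simp [h]

lemma sortCnt_spec (cmp : Int → Int → Bool)
    (Hmono : ∀ b a a', cmp b a = true → a ≤ a' → cmp b a' = true)
    (Hanti : ∀ b b' a, cmp b a = false → b ≤ b' → cmp b' a = false)
    (Hle : ∀ b a, cmp b a = true → b ≤ a)
    (Hge : ∀ b a, cmp b a = false → a ≤ b) :
    ∀ a : List Int, (sortCnt cmp a).1.Perm a ∧ (sortCnt cmp a).1.Pairwise (· ≤ ·) ∧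
      (sortCnt cmp a).2 = (cntPairs cmp a : Int) := by
  suffices H : ∀ N (a : List Int), a.length ≤ N →
      (sortCnt cmp a).1.Perm a ∧ (sortCnt cmp a).1.Pairwise (· ≤ ·) ∧
      (sortCnt cmp a).2 = (cntPairs cmp a : Int) by
    exact fun a => H a.length a le_rfl
  intro N
  induction N with
  | zero =>
    intro a hlen
    have h1 : a = [] := by cases a <;> simp_all
    subst h1
    simp [sortCnt_small cmp [] (by simp), cntPairs]
  | succ N ih =>
    intro a hlen
    by_cases h : a.length ≤ 1
    · rw [sortCnt_small cmp a h]
      refine ⟨List.Perm.refl a, ?_, ?_⟩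
      · match a, h with
        | [], _ => simp
        | [x], _ => simp
      · match a, h with
        | [], _ => simp [cntPairs]
        | [x], _ => simp [cntPairs]
    · have hmid1 : 1 ≤ a.length / 2 := by omega
      have hmid2 : a.length / 2 < a.length := by omega
      have htk : (a.take (a.length / 2)).length ≤ N := by
        simp; omega
      have hdp : (a.drop (a.length / 2)).length ≤ N := by
        simp; omega
      obtain ⟨hp1, hs1, hc1⟩ := ih (a.take (a.length / 2)) htk
      obtain ⟨hp2, hs2, hc2⟩ := ih (a.drop (a.length / 2)) hdp
      obtain ⟨hpm, hsm, hcm⟩ := mergeCnt_spec cmp Hmono Hanti Hle Hge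
        (sortCnt cmp (a.take (a.length / 2))).1 (sortCnt cmp (a.drop (a.length / 2))).1 hs1 hs2
      rw [sortCnt_step cmp a h]
      refine ⟨?_, hsm, ?_⟩
      · exact hpm.trans ((hp1.append hp2).trans (by rw [List.take_append_drop]))
      · rw [hcm, hc1, hc2, cross_perm cmp hp1 hp2]
        have : cntPairs cmp a
            = cntPairs cmp (a.take (a.length / 2)) + cntPairs cmp (a.drop (a.length / 2))
              + cross cmp (a.take (a.length / 2)) (a.drop (a.length / 2)) := by
          conv_lhs => rw [← List.take_append_drop (a.length / 2) a]
          exact cntPairs_append cmp _ _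
        rw [this]
        push_cast
        ring

-- per-row identity and the arithmetic form of sgnSum
lemma row_eq (a : Int) (t : List Int) :
    (t.map (fun b => sgn b a)).sum
      = (t.length : Int) - (t.countP (fun b => decide (b ≤ a)) : Int)
        - (t.countP (fun b => decide (b < a)) : Int) := by
  induction t with
  | nil => simp
  | cons c t ih =>
    rcases lt_trichotomy c a with h | h | h
    · have hs : sgn c a = -1 := by unfold sgn; rw [if_neg (by omega), if_neg (by omega)]
      have d1 : (decide (c ≤ a)) = true := by simp [le_of_lt h]
      have d2 : (decide (c < a)) = true := by simp [h]
      simp only [List.map_cons, List.sum_cons, List.length_cons, List.countP_cons,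
        hs, ih, d1, d2, if_true]
      push_cast
      ring
    · have hs : sgn c a = 0 := by unfold sgn; rw [if_neg (by omega), if_pos h]
      have d1 : (decide (c ≤ a)) = true := by simp [h]
      have d2 : (decide (c < a)) = false := by simp [h]
      simp only [List.map_cons, List.sum_cons, List.length_cons, List.countP_cons,
        hs, ih, d1, d2, if_true]
      push_cast
      ring
    · have hs : sgn c a = 1 := by unfold sgn; rw [if_pos h]
      have d1 : (decide (c ≤ a)) = false := by simp; omega
      have d2 : (decide (c < a)) = false := by simp; omega
      simp only [List.map_cons, List.sum_cons, List.length_cons, List.countP_cons,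
        hs, ih, d1, d2]
      push_cast
      ring

lemma sgnSum_eq (xs : List Int) :
    sgnSum xs = (↑(xs.length * (xs.length - 1) / 2) : Int)
      - ↑(cntPairs (fun b a => decide (b ≤ a)) xs) - ↑(cntPairs (fun b a => decide (b < a)) xs) := by
  induction xs with
  | nil => simp [sgnSum, cntPairs]
  | cons a t ih =>
    simp only [sgnSum, cntPairs, ih, row_eq, List.length_cons, Nat.add_sub_cancel]
    have h2 : (t.length + 1) * t.length = t.length * (t.length - 1) + 2 * t.length := by
      cases t with
      | nil => simp
      | cons c t' => simp only [List.length_cons, Nat.add_sub_cancel]; ring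
    have h3 : t.length * (t.length - 1) % 2 = 0 := by
      rcases Nat.even_or_odd t.length with he | ho
      · obtain ⟨k, hk⟩ := he
        have hkk : t.length * (t.length - 1) = 2 * (k * (t.length - 1)) := by
          rw [hk]; ring
        omega
      · obtain ⟨k, hk⟩ := ho
        have hkk : t.length * (t.length - 1) = 2 * (t.length * k) := by
          rw [show t.length - 1 = 2 * k from by omega]; ring
        omega
    have h4 : (t.length + 1) * t.length / 2 = t.length * (t.length - 1) / 2 + t.length := by
      omega
    rw [h4]
    omega

-- A's double loop as a double sum
def dblSum (x : List Int) : Int :=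
  ((PySem.List.pyRange 0 ((x.length : Int) - 1)).map (fun m =>
    ((PySem.List.pyRange (m + 1) (x.length : Int)).map (fun n =>
      sgn (PySem.List.pyGetD x n 0) (PySem.List.pyGetD x m 0))).sum)).sum

lemma pyRange_shift (a b : Int) :
    PySem.List.pyRange (a + 1) (b + 1) = (PySem.List.pyRange a b).map (· + 1) := by
  rw [PySem.List.pyRange_one, PySem.List.pyRange_one, List.map_map]
  have h : b + 1 - (a + 1) = b - a := by ring
  rw [h]
  refine List.map_congr_left ?_
  intro k _
  simp [Function.comp]
  ring

lemma sum_map_pyRange_shift (f : Int → Int) (a b : Int) :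
    ((PySem.List.pyRange (a + 1) (b + 1)).map f).sum
      = ((PySem.List.pyRange a b).map (fun n => f (n + 1))).sum := by
  rw [pyRange_shift, List.map_map]
  rfl

lemma pyGetD_cons_succ (a : Int) (t : List Int) (n : Int) (h : 0 ≤ n) (d : Int) :
    PySem.List.pyGetD (a :: t) (n + 1) d = PySem.List.pyGetD t n d := by
  obtain ⟨k, rfl⟩ := Int.eq_ofNat_of_zero_le h
  rw [show ((k : Int) + 1) = ((k + 1 : Nat) : Int) by push_cast; ring,
    PySem.List.pyGetD_natCast, PySem.List.pyGetD_natCast]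
  simp

lemma mk_trend_eq_dblSum (x : List Int) : mk_trend x = dblSum x := by
  unfold mk_trend dblSum
  rw [PySem.List.foldl_congr_mem _ _
      (fun s m => s + ((PySem.List.pyRange (m + 1) (x.length : Int)).map (fun n =>
        sgn (PySem.List.pyGetD x n 0) (PySem.List.pyGetD x m 0))).sum) 0 ?_]
  · rw [PySem.List.foldl_add]
    simp
  · intro acc m _
    rw [PySem.List.foldl_congr_mem _ _
        (fun s n => s + sgn (PySem.List.pyGetD x n 0) (PySem.List.pyGetD x m 0)) acc ?_]
    · rw [PySem.List.foldl_add]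
    · intro acc2 n _
      dsimp only
      unfold sgn
      rcases lt_trichotomy (PySem.List.pyGetD x n 0) (PySem.List.pyGetD x m 0) with h | h | h
      · have c1 : ¬ (PySem.List.pyGetD x n 0 > PySem.List.pyGetD x m 0) := by omega
        have c2 : ¬ (PySem.List.pyGetD x n 0 = PySem.List.pyGetD x m 0) := by omega
        rw [if_neg c1, if_neg c2, if_neg c1, if_neg c2]
        ring
      · have c1 : ¬ (PySem.List.pyGetD x n 0 > PySem.List.pyGetD x m 0) := by omega
        rw [if_neg c1, if_pos h, if_neg c1, if_pos h]
      · rw [if_pos h, if_pos h]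

lemma dblSum_eq_sgnSum (x : List Int) : dblSum x = sgnSum x := by
  induction x with
  | nil =>
    unfold dblSum
    rw [PySem.List.pyRange_one_eq_nil (by simp)]
    simp [sgnSum]
  | cons a t ih =>
    by_cases ht : t = []
    · subst ht
      have h1 : ((List.length [a] : Int) - 1) = 0 := by norm_num
      unfold dblSum
      rw [h1, PySem.List.pyRange_one_eq_nil le_rfl]
      simp [sgnSum]
    · have hT : (0 : Int) < (t.length : Int) := by
        cases t with
        | nil => exact absurd rfl ht
        | cons c t' => simp
      unfold dblSum
      simp only [List.length_cons, Nat.cast_add, Nat.cast_one, add_sub_cancel_right]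
      rw [PySem.List.pyRange_one_cons hT, List.map_cons, List.sum_cons]
      have hhead : ((PySem.List.pyRange (0 + 1) ((t.length : Int) + 1)).map (fun n =>
            sgn (PySem.List.pyGetD (a :: t) n 0) (PySem.List.pyGetD (a :: t) 0 0))).sum
          = (t.map (fun b => sgn b a)).sum := by
        have e0 : PySem.List.pyGetD (a :: t) 0 0 = a := by
          simp [PySem.List.pyGetD]
        simp only [e0]
        rw [sum_map_pyRange_shift]
        rw [List.map_congr_left (g := fun n => sgn (PySem.List.pyGetD t n 0) a) ?_]
        · conv_rhs => rw [← PySem.List.map_pyGetD_pyRange_zero t 0]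
          rw [List.map_map]
          rfl
        · intro n hn
          have h0 : 0 ≤ n := (PySem.List.mem_pyRange_one.mp hn).1
          rw [pyGetD_cons_succ a t n h0 0]
      have htail : ((PySem.List.pyRange (0 + 1) (t.length : Int)).map (fun m =>
            ((PySem.List.pyRange (m + 1) ((t.length : Int) + 1)).map (fun n =>
              sgn (PySem.List.pyGetD (a :: t) n 0) (PySem.List.pyGetD (a :: t) m 0))).sum)).sum
          = dblSum t := by
        conv_lhs => rw [show ((t.length : Int)) = ((t.length : Int) - 1) + 1 by ring]
        rw [sum_map_pyRange_shift]
        unfold dblSum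
        refine congrArg _ (List.map_congr_left ?_)
        intro m hm
        have h0 : 0 ≤ m := (PySem.List.mem_pyRange_one.mp hm).1
        rw [sum_map_pyRange_shift]
        simp only [show ((t.length : Int) - 1 + 1) = (t.length : Int) from by ring]
        refine congrArg _ (List.map_congr_left ?_)
        intro n hn
        have h1 : 0 ≤ n := by
          have := (PySem.List.mem_pyRange_one.mp hn).1
          omega
        rw [pyGetD_cons_succ a t n h1 0, pyGetD_cons_succ a t m h0 0]
      rw [hhead, htail, ih]
      rfl

-- ===== VERDICT (by name: the statement is the Claim_ definition above) =====
theorem mk_trend_spec : Claim_equal_mk_trend := by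
  intro x _
  show mk_trend x = mk_trend_alt x
  have hlt := sortCnt_spec (fun b a => decide (b < a))
    (by intro b a a' h h'; simp_all; omega) (by intro b b' a h h'; simp_all; omega)
    (by intro b a h; simp_all; omega) (by intro b a h; simp_all) x
  have hle := sortCnt_spec (fun b a => decide (b ≤ a))
    (by intro b a a' h h'; simp_all; omega) (by intro b b' a h h'; simp_all; omega)
    (by intro b a h; simp_all) (by intro b a h; simp_all; omega) x
  rw [mk_trend_eq_dblSum, dblSum_eq_sgnSum, sgnSum_eq]
  have halt : mk_trend_alt x = PySem.Int.floordiv ((x.length : Int) * ((x.length : Int) - 1)) 2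
      - (sortCnt (fun b a => decide (b ≤ a)) x).2 - (sortCnt (fun b a => decide (b < a)) x).2 := rfl
  rw [halt, hlt.2.2, hle.2.2]
  have hfd : PySem.Int.floordiv ((x.length : Int) * ((x.length : Int) - 1)) 2
      = (↑(x.length * (x.length - 1) / 2) : Int) := by
    cases x with
    | nil => decide
    | cons a t =>
      have h1 : ((a :: t).length : Int) * (((a :: t).length : Int) - 1)
          = (((a :: t).length * ((a :: t).length - 1) : Nat) : Int) := by
        push_cast [List.length_cons]; ring
      rw [h1]
      exact_mod_cast PySem.Int.floordiv_natCast _ 2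
  rw [hfd]
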